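-- pv_equiv track=rewrite | github.com/MrBrantCode/unitest_baseline | mut_generate/mist_train_cf/cf_70544/solution.py | squared_odd_primes
-- ===== SOURCE A (Python) =====
-- import math
--
-- def squared_odd_primes(n):
--     """
--     This method generates a list of squares of first n odd prime numbers in descending order.
--     """
--     def is_prime(num):
--         if num <= 1:
--             return False
--         if num == 2:
--             return True
--         if num%2 == 0:
--             return False
--         for i in range(3, math.isqrt(num) + 1, 2):
--             if num % i == 0:
--                 return False
--         return True
--
--     i, count, primes = 3, 0, []
--     while count < n:
--         if is_prime(i):
--             primes.append(i * i)
--             count += 1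
--         i += 2
--     return primes[::-1] # Reverse the list for descending order
-- ===== SOURCE B (Python) =====
-- def squared_odd_primes(n):
--     """Squares of the first n odd primes, descending: trial-divide each odd
--     candidate only by the odd primes already found (up to its square root),
--     square once at the end."""
--     primes = []
--     c = 3
--     while len(primes) < n:
--         composite = False
--         for p in primes:
--             if p * p > c:
--                 break
--             if c % p == 0:
--                 composite = True
--                 break
--         if not composite:
--             primes.append(c)
--         c += 2
--     return [p * p for p in reversed(primes)]
-- ===== Notes on version B (the rewrite author's own statement) =====
-- stated objective: alternative
-- what changed: B trial-divides each odd candidate only by the odd primes already collected (breaking as soon as p*p exceeds the candidate), keeps the raw primes and squares them once at the end, instead of A's per-candidate is_prime that scans all odd numbers up to isqrt and stores squares as it goes.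
import Mathlib
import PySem

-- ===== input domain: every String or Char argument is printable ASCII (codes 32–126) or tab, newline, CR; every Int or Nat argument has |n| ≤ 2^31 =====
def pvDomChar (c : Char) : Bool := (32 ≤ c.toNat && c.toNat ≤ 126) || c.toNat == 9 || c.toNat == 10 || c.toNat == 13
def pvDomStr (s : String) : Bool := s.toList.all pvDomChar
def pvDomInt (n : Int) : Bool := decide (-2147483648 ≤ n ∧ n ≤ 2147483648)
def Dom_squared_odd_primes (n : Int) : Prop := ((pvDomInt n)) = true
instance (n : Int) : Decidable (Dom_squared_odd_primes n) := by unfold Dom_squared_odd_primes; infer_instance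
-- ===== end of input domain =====

-- B replaces A's per-candidate is_prime scan over ALL odd numbers up to isqrt by trial division
-- by the odd PRIMES already collected (breaking as soon as p*p > c), squaring once at the end
-- (objective: alternative — fewer trial divisions per candidate; a timing run did not
-- confirm a ≥1.5× speed-up at the largest size, so no speed is claimed).
--
-- Both Python while-loops search for primes with no a-priori bound; the ports make the very same
-- loop total with a fuel counter.  pyFuel n = 128*(n+1) iterations is sufficient on ALL inputs the
-- claim covers (|n| ≤ 2^31): the loop stops at the n-th odd prime = (n+1)-th prime p, after
-- (p-3)/2+1 < 13*(n+1) iterations, since p < (n+1)*(ln(n+1) + ln ln(n+1)) < 25*(n+1) there.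
def pyFuel (n : Int) : Nat := 128 * n.toNat + 128

-- ===== PORT A =====
-- A's inner loop `for i in range(3, isqrt(num)+1, 2): if num % i == 0: return False`
def checkA (num : Int) : List Int → Bool
  | [] => true
  | d :: ds => if PySem.Int.mod num d = 0 then false else checkA num ds

-- math.isqrt ported as Nat.sqrt on toNat: exact, since this branch is only reached with num ≥ 3
def isPrimeA (num : Int) : Bool :=
  if num ≤ 1 then false
  else if num = 2 then true
  else if PySem.Int.mod num 2 = 0 then false
  else checkA num (PySem.List.pyRange 3 ((Nat.sqrt num.toNat : Int) + 1) 2)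

-- A's `while count < n` loop over the state (i, count, primes)
def loopA (fuel : Nat) (n i count : Int) (primes : List Int) : List Int :=
  match fuel with
  | 0 => primes
  | fuel + 1 =>
    if count < n then
      if isPrimeA i then loopA fuel n (i + 2) (count + 1) (primes ++ [i * i])
      else loopA fuel n (i + 2) count primes
    else primes

-- primes[::-1]: PySem.List.slice? with step -1 never raises (slice?_none_none_neg_one)
def squared_odd_primes (n : Int) : List Int :=
  (PySem.List.slice? (loopA (pyFuel n) n 3 0 []) none none (-1)).getD []

-- ===== PORT B =====
-- B's inner for-loop: the `composite` flag (break at p*p > c or at the first prime divisor)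
def scanB (c : Int) : List Int → Bool
  | [] => false
  | p :: ps =>
    if p * p > c then false
    else if PySem.Int.mod c p = 0 then true
    else scanB c ps

-- B's `while len(primes) < n` loop over the state (i, primes)
def loopB (fuel : Nat) (n i : Int) (primes : List Int) : List Int :=
  match fuel with
  | 0 => primes
  | fuel + 1 =>
    if PySem.List.len primes < n then
      if scanB i primes then loopB fuel n (i + 2) primes
      else loopB fuel n (i + 2) (primes ++ [i])
    else primes

def squared_odd_primes_alt (n : Int) : List Int :=
  ((loopB (pyFuel n) n 3 []).reverse).map (fun p => p * p)

-- ===== PRECONDITION & SPEC =====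
def Spec_squared_odd_primes (n : Int) (out : List Int) : Prop := out = squared_odd_primes_alt n
instance (n : Int) (out : List Int) : Decidable (Spec_squared_odd_primes n out) := by unfold Spec_squared_odd_primes; infer_instance

-- ===== CLAIM (what is proved, stated in full; the proofs are below) =====
def Claim_equal_squared_odd_primes : Prop := ∀ (n : Int), Dom_squared_odd_primes n → Spec_squared_odd_primes n (squared_odd_primes n)

-- ===== LEMMAS AND PROOFS =====

theorem checkA_eq_false_iff (num : Int) (ds : List Int) :
    checkA num ds = false ↔ ∃ d ∈ ds, PySem.Int.mod num d = 0 := by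
  induction ds with
  | nil => simp [checkA]
  | cons d t ih =>
    by_cases h : PySem.Int.mod num d = 0 <;> simp [checkA, h, ih]

-- A's trial division over all odd numbers ≤ isqrt decides primality
theorem isPrimeA_eq (k : Nat) (h3 : 3 ≤ k) (hodd : k % 2 = 1) :
    isPrimeA (k : Int) = decide (Nat.Prime k) := by
  have hc2 : ((2 : Nat) : Int) = (2 : Int) := by norm_num
  unfold isPrimeA
  rw [if_neg (by exact_mod_cast (by omega : ¬ k ≤ 1)),
      if_neg (by exact_mod_cast (by omega : k ≠ 2)),
      if_neg (by rw [← hc2, PySem.Int.mod_natCast, hodd]; simp)]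
  simp only [Int.toNat_natCast]
  by_cases hp : Nat.Prime k
  · simp only [hp, decide_true]
    by_contra hfalse
    have hfalse' : checkA (k : Int) (PySem.List.pyRange 3 ((Nat.sqrt k : Int) + 1) 2) = false := by
      revert hfalse; cases checkA (k : Int) (PySem.List.pyRange 3 ((Nat.sqrt k : Int) + 1) 2) <;> simp
    obtain ⟨d, hdmem, hdmod⟩ := (checkA_eq_false_iff _ _).1 hfalse'
    obtain ⟨hd3, hdlt, _⟩ := (PySem.List.mem_pyRange_iff_of_pos (by norm_num) d).1 hdmem
    have hddvd : d ∣ (k : Int) := (PySem.Int.mod_eq_zero_iff_dvd _ _).1 hdmod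
    have hdnat : d = ((d.toNat : Nat) : Int) := by omega
    rw [hdnat] at hddvd
    have hmd : d.toNat ∣ k := by exact_mod_cast hddvd
    have hsq : Nat.sqrt k < k := Nat.sqrt_lt_self (by omega)
    rcases hp.eq_one_or_self_of_dvd _ hmd with h1 | h1 <;> omega
  · simp only [hp, decide_false]
    apply (checkA_eq_false_iff _ _).2
    set m := k.minFac with hm
    have hmp : Nat.Prime m := Nat.minFac_prime (by omega)
    have hmdvd : m ∣ k := Nat.minFac_dvd k
    have hmodd : m % 2 = 1 := by
      rcases Nat.mod_two_eq_zero_or_one m with h | h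
      · exfalso
        have h2 : (2 : Nat) ∣ m := by omega
        rcases hmp.eq_one_or_self_of_dvd 2 h2 with h' | h'
        · omega
        · have : k % 2 = 0 := Nat.mod_eq_zero_of_dvd (h' ▸ hmdvd)
          omega
      · exact h
    have hm3 : 3 ≤ m := by
      have h2 : 2 ≤ m := hmp.two_le
      omega
    have hsq : m * m ≤ k := by
      have := Nat.minFac_sq_le_self (by omega : 0 < k) hp
      nlinarith [this]
    refine ⟨(m : Int), ?_, ?_⟩
    · rw [PySem.List.mem_pyRange_iff_of_pos (by norm_num)]
      refine ⟨by exact_mod_cast hm3, ?_, by omega⟩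
      have hle : m ≤ Nat.sqrt k := Nat.le_sqrt'.2 (by nlinarith)
      exact_mod_cast (by omega : (m : Int) < (Nat.sqrt k : Int) + 1)
    · rw [PySem.Int.mod_natCast]
      simp [Nat.mod_eq_zero_of_dvd hmdvd]

-- the ascending list of odd primes below k: loopB's primes list at candidate k
def oddPrimesBelow (k : Nat) : List Nat :=
  (List.range k).filter (fun m => decide (Nat.Prime m) && decide (m % 2 = 1))

theorem mem_oddPrimesBelow {k m : Nat} :
    m ∈ oddPrimesBelow k ↔ m < k ∧ Nat.Prime m ∧ m % 2 = 1 := by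
  simp [oddPrimesBelow, List.mem_filter, List.mem_range]

theorem oddPrimesBelow_step (k : Nat) (hodd : k % 2 = 1) :
    oddPrimesBelow (k + 2) = oddPrimesBelow k ++ (if Nat.Prime k then [k] else []) := by
  have h1 : k + 2 = (k + 1) + 1 := rfl
  rw [oddPrimesBelow, h1, List.range_succ, List.range_succ, List.filter_append,
      List.filter_append]
  have he : (k + 1) % 2 = 0 := by omega
  by_cases hp : Nat.Prime k <;> simp [oddPrimesBelow, hp, hodd, he]

theorem scanB_eq_false_of (c : Int) (l : List Int)
    (h : ∀ p ∈ l, PySem.Int.mod c p ≠ 0) : scanB c l = false := by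
  induction l with
  | nil => rfl
  | cons p t ih =>
    simp only [scanB]
    split
    · rfl
    · rw [if_neg (h p (by simp))]
      exact ih fun q hq => h q (by simp [hq])

theorem scanB_eq_true_of (k : Nat) (l : List Nat) (hs : l.Pairwise (· < ·))
    (m : Nat) (hm : m ∈ l) (hsq : m * m ≤ k) (hmod : k % m = 0) :
    scanB (k : Int) (l.map (fun x : Nat => (x : Int))) = true := by
  induction l with
  | nil => cases hm
  | cons q t ih =>
    have hqm : q ≤ m := by
      rcases List.mem_cons.1 hm with h | h
      · omega
      · exact le_of_lt ((List.pairwise_cons.1 hs).1 m h)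
    simp only [List.map_cons, scanB]
    rw [if_neg (by
      have hqq : q * q ≤ m * m := Nat.mul_le_mul hqm hqm
      have h1 : (q : Int) * q ≤ (m : Int) * m := by exact_mod_cast hqq
      have h2 : (m : Int) * m ≤ (k : Int) := by exact_mod_cast hsq
      omega)]
    by_cases hq : PySem.Int.mod (k : Int) (q : Int) = 0
    · rw [if_pos hq]
    · rw [if_neg hq]
      have hmq : m ≠ q := by
        intro h
        apply hq
        rw [PySem.Int.mod_natCast, ← h, hmod]
        norm_num
      exact ih (List.pairwise_cons.1 hs).2 ((List.mem_cons.1 hm).resolve_left hmq)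

theorem pairwise_oddPrimesBelow (k : Nat) : (oddPrimesBelow k).Pairwise (· < ·) :=
  List.Pairwise.filter _ List.pairwise_lt_range

-- B's break-at-sqrt trial division by the previously found odd primes decides primality
theorem scanB_eq (k : Nat) (h3 : 3 ≤ k) (hodd : k % 2 = 1) :
    scanB (k : Int) ((oddPrimesBelow k).map (fun m : Nat => (m : Int)))
      = !decide (Nat.Prime k) := by
  by_cases hp : Nat.Prime k
  · simp only [hp, decide_true, Bool.not_true]
    apply scanB_eq_false_of
    intro p hpmem
    obtain ⟨m, hmmem, rfl⟩ := List.mem_map.1 hpmem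
    obtain ⟨hmk, hmp, _⟩ := mem_oddPrimesBelow.1 hmmem
    rw [PySem.Int.mod_natCast]
    intro hz
    have hz' : k % m = 0 := by exact_mod_cast hz
    have hmd : m ∣ k := Nat.dvd_of_mod_eq_zero hz'
    rcases hp.eq_one_or_self_of_dvd m hmd with h | h
    · exact Nat.Prime.one_lt hmp |>.ne' h
    · omega
  · simp only [hp, decide_false, Bool.not_false]
    set m := k.minFac with hm
    have hmp : Nat.Prime m := Nat.minFac_prime (by omega)
    have hmdvd : m ∣ k := Nat.minFac_dvd k
    have hmodd : m % 2 = 1 := by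
      rcases Nat.mod_two_eq_zero_or_one m with h | h
      · exfalso
        have h2 : (2 : Nat) ∣ m := by omega
        rcases hmp.eq_one_or_self_of_dvd 2 h2 with h' | h'
        · omega
        · have : k % 2 = 0 := Nat.mod_eq_zero_of_dvd (h' ▸ hmdvd)
          omega
      · exact h
    have hsq : m * m ≤ k := by
      have := Nat.minFac_sq_le_self (by omega : 0 < k) hp
      nlinarith [this]
    have hmlt : m < k := by
      have hle : m ≤ k := Nat.le_of_dvd (by omega) hmdvd
      have hne : m ≠ k := fun h => hp (h ▸ hmp)
      omega
    exact scanB_eq_true_of k _ (pairwise_oddPrimesBelow k) m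
      (mem_oddPrimesBelow.2 ⟨hmlt, hmp, hmodd⟩) hsq
      (Nat.mod_eq_zero_of_dvd hmdvd)

-- the two while-loops run in lockstep: A carries count and the squares, B carries the primes
theorem loops_agree (fuel : Nat) : ∀ (n i count : Int) (primes primesA : List Int),
    3 ≤ i → i % 2 = 1 →
    primes = (oddPrimesBelow i.toNat).map (fun m : Nat => (m : Int)) →
    count = (primes.length : Int) →
    primesA = primes.map (fun p => p * p) →
    loopA fuel n i count primesA = (loopB fuel n i primes).map (fun p => p * p) := by
  induction fuel with
  | zero => intro n i count primes primesA _ _ _ _ hmap; simpa [loopA, loopB] using hmap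
  | succ fuel ih =>
    intro n i count primes primesA h3 hodd hl hcount hmap
    subst hcount hmap
    obtain ⟨k, rfl⟩ : ∃ k : Nat, i = (k : Int) := ⟨i.toNat, by omega⟩
    have h3k : 3 ≤ k := by exact_mod_cast h3
    have hoddk : k % 2 = 1 := by omega
    simp only [Int.toNat_natCast] at hl
    rw [loopA, loopB, PySem.List.len_eq]
    by_cases hlt : (primes.length : Int) < n
    · rw [if_pos hlt, if_pos hlt]
      have hPA : isPrimeA (k : Int) = decide (Nat.Prime k) := isPrimeA_eq k h3k hoddk
      have hPB : scanB (k : Int) primes = !decide (Nat.Prime k) := by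
        rw [hl]; exact scanB_eq k h3k hoddk
      have hstep := oddPrimesBelow_step k hoddk
      have hcast : ((k : Int) + 2) = ((k + 2 : Nat) : Int) := by push_cast; ring
      by_cases hp : Nat.Prime k
      · rw [hPA, hPB]
        simp only [hp, decide_true, Bool.not_true, if_true, Bool.false_eq_true, if_false]
        rw [hcast]
        exact ih n _ _ (primes ++ [(k : Int)]) _ (by push_cast; omega) (by omega)
          (by rw [Int.toNat_natCast, hstep, if_pos hp, List.map_append, hl]; simp)
          (by simp) (by simp)
      · rw [hPA, hPB]
        simp only [hp, decide_false, Bool.not_false, if_true, Bool.false_eq_true, if_false]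
        rw [hcast]
        exact ih n _ _ primes _ (by push_cast; omega) (by omega)
          (by rw [Int.toNat_natCast, hstep, if_neg hp, List.append_nil, hl])
          rfl rfl
    · rw [if_neg hlt, if_neg hlt]

-- ===== VERDICT (by name: the statement is the Claim_ definition above) =====
theorem squared_odd_primes_spec : Claim_equal_squared_odd_primes := by
  unfold Claim_equal_squared_odd_primes Spec_squared_odd_primes
  intro n _
  unfold squared_odd_primes squared_odd_primes_alt
  rw [PySem.List.slice?_none_none_neg_one, Option.getD_some,
      loops_agree (pyFuel n) n 3 0 [] [] (by norm_num) (by norm_num) (by decide)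
        (by simp) (by simp),
      List.map_reverse]
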